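-- pv_equiv track=rewrite | github.com/Hygens/hackerearth_hackerrank_solutions | python_problems_competitive/FindMaximumIndexProduct.py | nextHighest
-- ===== SOURCE A (Python) =====
-- def nextHighest(seq):
--     L = []
--     size = len(seq)
--     if size==1 or size==2: return 0
--     elif size==3:
--         l = 1 if seq[0]>seq[1] else 0
--         r = 3 if seq[2]>seq[1] else 0
--         L.append(l*r)
--     else:
--         for i in range(1,size):
--             l = next((j+1 for j in range(i,-1,-1) if seq[j]>seq[i]),0)
--             r = next((j+1 for j in range(i,size) if seq[j]>seq[i]),0)
--             L.append(l*r)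
--     if len(L)>0: return max(L)
--     else: return 0
-- ===== SOURCE B (Python) =====
-- def nextHighest(seq):
--     n = len(seq)
--     # pass 1: nearest greater to the left (1-based position, 0 if none), monotonic stack
--     left = []
--     stack = []
--     for i in range(n):
--         while stack and seq[stack[-1]] <= seq[i]:
--             stack.pop()
--         left.append(stack[-1] + 1 if stack else 0)
--         stack.append(i)
--     # pass 2: nearest greater to the right, combined with the running maximum product
--     best = 0
--     stack = []
--     for i in range(n - 1, -1, -1):
--         while stack and seq[stack[-1]] <= seq[i]:
--             stack.pop()
--         r = stack[-1] + 1 if stack else 0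
--         p = left[i] * r
--         if p > best:
--             best = p
--         stack.append(i)
--     return best
-- ===== Notes on version B (the rewrite author's own statement) =====
-- stated objective: faster
-- what changed: A scans left and right from every index to find the nearest greater element (quadratic); B computes all nearest-greater-left positions with one monotonic-stack pass and combines nearest-greater-right with the running maximum product in a second stack pass.
import Mathlib
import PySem

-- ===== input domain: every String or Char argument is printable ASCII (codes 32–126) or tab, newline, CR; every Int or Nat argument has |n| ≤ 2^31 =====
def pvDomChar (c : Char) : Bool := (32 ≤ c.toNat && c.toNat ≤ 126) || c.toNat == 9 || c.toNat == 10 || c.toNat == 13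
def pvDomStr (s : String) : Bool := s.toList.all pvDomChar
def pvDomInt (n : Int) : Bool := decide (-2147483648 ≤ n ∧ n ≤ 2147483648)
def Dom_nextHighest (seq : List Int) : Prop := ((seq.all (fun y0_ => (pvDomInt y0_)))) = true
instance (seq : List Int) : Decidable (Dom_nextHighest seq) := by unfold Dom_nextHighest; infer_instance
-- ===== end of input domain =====

-- B replaces A's quadratic per-index scans for the nearest greater element on each side by two
-- monotonic-stack passes; same return value on every input.

-- ===== PORT A =====
-- per-index body of A's main loop: l = nearest greater to the left (1-based), r = nearest greater
-- to the right, product l*r; the seq[j]/seq[i] indices are always in range here, so pyGetD is exact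
def aBody (seq : List Int) (size : Int) (i : Int) : Int :=
  let l : Int :=
    match (PySem.List.pyRange i (-1) (-1)).find?
        (fun j => decide (PySem.List.pyGetD seq j 0 > PySem.List.pyGetD seq i 0)) with
    | some j => j + 1
    | none => 0
  let r : Int :=
    match (PySem.List.pyRange i size 1).find?
        (fun j => decide (PySem.List.pyGetD seq j 0 > PySem.List.pyGetD seq i 0)) with
    | some j => j + 1
    | none => 0
  l * r

def nextHighest (seq : List Int) : Int :=
  let size : Int := (seq.length : Int)
  if size = 1 ∨ size = 2 then 0
  else
    let L : List Int :=
      if size = 3 then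
        let l : Int := if PySem.List.pyGetD seq 0 0 > PySem.List.pyGetD seq 1 0 then 1 else 0
        let r : Int := if PySem.List.pyGetD seq 2 0 > PySem.List.pyGetD seq 1 0 then 3 else 0
        [l * r]
      else
        (PySem.List.pyRange 1 size 1).map (aBody seq size)
    -- Python evaluates max(L) only when L is nonempty, so the .getD 0 default is never used
    if 0 < L.length then (PySem.List.max? L (fun y => y)).getD 0 else 0

-- ===== PORT B =====
-- Source B's while-pop loop: pop while stack nonempty and seq[stack[-1]] <= seq[i]
-- (stack entries and i are always in range, so getD is exact)
def altStack (seq : List Int) (stack : List Nat) (i : Nat) : List Nat :=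
  stack.dropWhile (fun t => decide (seq.getD t 0 ≤ seq.getD i 0))

-- 'stack[-1] + 1 if stack else 0'
def altTop (stack : List Nat) : Int :=
  match stack with
  | t :: _ => (t : Int) + 1
  | [] => 0

-- one iteration of Source B's first loop (append to left[], push i)
def altStep1 (seq : List Int) (st : List Int × List Nat) (i : Nat) : List Int × List Nat :=
  let s := altStack seq st.2 i
  (st.1 ++ [altTop s], i :: s)

-- one iteration of Source B's second loop (update running best, push i)
def altStep2 (seq : List Int) (left : List Int) (st : Int × List Nat) (i : Nat) : Int × List Nat :=
  let s := altStack seq st.2 i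
  let p := left.getD i 0 * altTop s
  (if p > st.1 then p else st.1, i :: s)

def nextHighest_alt (seq : List Int) : Int :=
  let left := ((List.range seq.length).foldl (altStep1 seq) ([], [])).1
  (((List.range seq.length).reverse).foldl (altStep2 seq left) (0, [])).1

-- ===== PRECONDITION & SPEC =====
def Spec_nextHighest (seq : List Int) (out : Int) : Prop := out = nextHighest_alt seq
instance (seq : List Int) (out : Int) : Decidable (Spec_nextHighest seq out) := by unfold Spec_nextHighest; infer_instance

-- ===== CLAIM (what is proved, stated in full; the proofs are below) =====
def Claim_equal_nextHighest : Prop := ∀ (seq : List Int), Dom_nextHighest seq → Spec_nextHighest seq (nextHighest seq)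

-- ===== LEMMAS AND PROOFS =====

-- value at an (always in-range) index
def gfun (seq : List Int) (i : Nat) : Int := seq.getD i 0
-- value seen by the right-to-left pass at processing position t
def hfun (seq : List Int) (t : Nat) : Int := gfun seq (seq.length - 1 - t)

-- 1-based position of the nearest element greater than seq[i] to the left, 0 if none
def lVal (seq : List Int) (i : Nat) : Int :=
  match ((List.range i).reverse).find? (fun j => decide (gfun seq i < gfun seq j)) with
  | some j => (j : Int) + 1
  | none => 0

-- 1-based position of the nearest element greater than seq[i] to the right, 0 if none
def rVal (seq : List Int) (i : Nat) : Int :=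
  match ((List.range (seq.length - 1 - i)).reverse).find?
      (fun s => decide (hfun seq (seq.length - 1 - i) < hfun seq s)) with
  | some s => ((seq.length - 1 - s : Nat) : Int) + 1
  | none => 0

def pVal (seq : List Int) (i : Nat) : Int := lVal seq i * rVal seq i

def maxAll (seq : List Int) : Int := ((List.range seq.length).map (pVal seq)).foldl max 0

-- abstract monotonic stack after processing positions 0..i-1 with values h
def mstack (h : Nat → Int) : Nat → List Nat
  | 0 => []
  | i+1 => i :: (mstack h i).dropWhile (fun t => decide (h t ≤ h i))

lemma head_dropWhile_false {α : Type} (p : α → Bool) :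
    ∀ (l : List α) {a : α} {t : List α}, l.dropWhile p = a :: t → p a = false := by
  intro l
  induction l with
  | nil => intro a t h; simp [List.dropWhile] at h
  | cons x xs ih =>
    intro a t h
    by_cases hx : p x
    · rw [List.dropWhile_cons_of_pos hx] at h; exact ih h
    · rw [List.dropWhile_cons_of_neg hx] at h
      cases h; simpa using hx

lemma mem_dropWhile_of_mem {α : Type} (p : α → Bool) {l : List α} {x : α}
    (hx : x ∈ l) (hpx : p x = false) : x ∈ l.dropWhile p := by
  have hsplit := List.takeWhile_append_dropWhile (p := p) (l := l)
  rw [← hsplit] at hx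
  rcases List.mem_append.1 hx with h | h
  · have := List.mem_takeWhile_imp h; rw [hpx] at this; cases this
  · exact h

lemma altTop_eq_head? (s : List Nat) :
    altTop s = (match s.head? with | some t => (t : Int) + 1 | none => 0) := by
  cases s <;> rfl

lemma find?_eq_head?_dropWhile_not {α : Type} (p : α → Bool) :
    ∀ (l : List α), l.find? p = (l.dropWhile (fun x => !p x)).head? := by
  intro l
  induction l with
  | nil => rfl
  | cons a t ih =>
    by_cases h : p a
    · rw [List.find?_cons_of_pos h, List.dropWhile_cons]
      simp [h]
    · rw [List.find?_cons_of_neg (by simpa using h), List.dropWhile_cons]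
      simp [h, ih]

lemma pairwise_gt_reverse_range (n : Nat) :
    ((List.range n).reverse).Pairwise (fun a b => a > b) := by
  rw [List.pairwise_reverse]
  exact List.pairwise_lt_range

lemma mstack_sublist (h : Nat → Int) (i : Nat) : (mstack h i).Sublist ((List.range i).reverse) := by
  induction i with
  | zero => simp [mstack]
  | succ i ih =>
    rw [List.range_succ, List.reverse_append, List.reverse_singleton, List.singleton_append]
    simp only [mstack]
    exact List.Sublist.cons₂ i ((List.dropWhile_sublist _).trans ih)

lemma mstack_pairwise (h : Nat → Int) (i : Nat) : (mstack h i).Pairwise (fun a b => a > b) :=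
  List.Pairwise.sublist (mstack_sublist h i) (pairwise_gt_reverse_range i)

lemma mem_mstack (h : Nat → Int) :
    ∀ (i j : Nat), j ∈ mstack h i ↔ (j < i ∧ ∀ k, j < k → k < i → h k < h j) := by
  intro i
  induction i with
  | zero => intro j; simp [mstack]
  | succ i ih =>
    intro j
    constructor
    · intro hj
      rcases List.mem_cons.1 hj with rfl | hj'
      · exact ⟨Nat.lt_succ_self _, fun k hk1 hk2 => by omega⟩
      · have hmem : j ∈ mstack h i := List.Sublist.mem hj' (List.dropWhile_sublist _)
        have hji := (ih j).1 hmem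
        have hij : h i < h j := by
          rcases hd : (mstack h i).dropWhile (fun t => decide (h t ≤ h i)) with _ | ⟨a, t⟩
          · rw [hd] at hj'; cases hj'
          · rw [hd] at hj'
            have ha : ¬ (h a ≤ h i) := by simpa using head_dropWhile_false _ _ hd
            rcases List.mem_cons.1 hj' with rfl | hjt
            · omega
            · have hpw : (a :: t).Pairwise (fun a b => a > b) :=
                hd ▸ List.Pairwise.sublist (List.dropWhile_sublist _) (mstack_pairwise h i)
              have haj : a > j := (List.pairwise_cons.1 hpw).1 j hjt
              have hamem : a ∈ mstack h i :=
                List.Sublist.mem (by rw [hd]; exact List.mem_cons_self ..) (List.dropWhile_sublist _)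
              have hai := (ih a).1 hamem
              have : h a < h j := hji.2 a haj hai.1
              omega
        refine ⟨by omega, fun k hk1 hk2 => ?_⟩
        rcases Nat.lt_succ_iff_lt_or_eq.1 hk2 with hlt | rfl
        · exact hji.2 k hk1 hlt
        · exact hij
    · rintro ⟨hj1, hj2⟩
      rcases Nat.lt_succ_iff_lt_or_eq.1 hj1 with hlt | rfl
      · refine List.mem_cons_of_mem _ (mem_dropWhile_of_mem _
          ((ih j).2 ⟨hlt, fun k hk1 hk2 => hj2 k hk1 (by omega)⟩) ?_)
        have : h i < h j := hj2 i hlt (Nat.lt_succ_self i)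
        simp; omega
      · exact List.mem_cons_self ..

lemma find?_of_pairwise_gt (p : Nat → Bool) :
    ∀ (l : List Nat), l.Pairwise (fun a b => a > b) → ∀ j, j ∈ l → p j = true →
      (∀ k, k ∈ l → j < k → p k = false) → l.find? p = some j := by
  intro l
  induction l with
  | nil => intro _ j hj; cases hj
  | cons a t ih =>
    intro hpw j hj hpj hlater
    rcases List.mem_cons.1 hj with rfl | hjt
    · exact List.find?_cons_of_pos hpj
    · have haj : a > j := (List.pairwise_cons.1 hpw).1 j hjt
      have hpa : p a = false := hlater a (List.mem_cons_self ..) haj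
      rw [List.find?_cons_of_neg (by simp [hpa])]
      exact ih (List.pairwise_cons.1 hpw).2 j hjt hpj
        (fun k hk hjk => hlater k (List.mem_cons_of_mem _ hk) hjk)

lemma find?_some_later_false (p : Nat → Bool) :
    ∀ (l : List Nat), l.Pairwise (fun a b => a > b) → ∀ j, l.find? p = some j →
      ∀ k, k ∈ l → j < k → p k = false := by
  intro l
  induction l with
  | nil => intro _ j hj; cases hj
  | cons a t ih =>
    intro hpw j hfind k hk hjk
    by_cases hpa : p a
    · rw [List.find?_cons_of_pos hpa] at hfind
      obtain rfl : a = j := Option.some.inj hfind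
      rcases List.mem_cons.1 hk with rfl | hkt
      · exact absurd hjk (lt_irrefl _)
      · have := (List.pairwise_cons.1 hpw).1 k hkt
        exact absurd hjk (by omega)
    · rw [List.find?_cons_of_neg (by simpa using hpa)] at hfind
      rcases List.mem_cons.1 hk with rfl | hkt
      · simpa using hpa
      · exact ih (List.pairwise_cons.1 hpw).2 j hfind k hkt hjk

lemma find?_mstack (h : Nat → Int) (i : Nat) :
    (mstack h i).find? (fun j => decide (h i < h j)) =
      ((List.range i).reverse).find? (fun j => decide (h i < h j)) := by
  rcases hfr : ((List.range i).reverse).find? (fun j => decide (h i < h j)) with _ | j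
  · rw [List.find?_eq_none] at hfr ⊢
    intro x hx
    exact hfr x (List.Sublist.mem hx (mstack_sublist h i))
  · have hmem := List.mem_of_find?_eq_some hfr
    have hpj := List.find?_some hfr
    have hlater := find?_some_later_false _ _ (pairwise_gt_reverse_range i) j hfr
    have hjlt : j < i := by simpa using hmem
    have hji : j ∈ mstack h i := by
      refine (mem_mstack h i j).2 ⟨hjlt, fun k hk1 hk2 => ?_⟩
      have hk : (fun j => decide (h i < h j)) k = false :=
        hlater k (by simpa using hk2) hk1
      simp at hk hpj
      omega
    refine find?_of_pairwise_gt _ _ (mstack_pairwise h i) j hji hpj ?_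
    intro k hk hjk
    have hki : k < i := ((mem_mstack h i k).1 hk).1
    exact hlater k (by simpa using hki) hjk

lemma lVal_mstack (seq : List Int) (i : Nat) :
    altTop ((mstack (gfun seq) i).dropWhile (fun t => decide (gfun seq t ≤ gfun seq i))) =
      lVal seq i := by
  have hpred : (fun t => decide (gfun seq t ≤ gfun seq i)) =
      (fun t => !(fun j => decide (gfun seq i < gfun seq j)) t) := by
    funext t; simp only [← decide_not, not_lt]
  rw [hpred, altTop_eq_head?, ← find?_eq_head?_dropWhile_not, find?_mstack]
  unfold lVal
  rcases ((List.range i).reverse).find? (fun j => decide (gfun seq i < gfun seq j)) with _ | j <;> rfl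

lemma rVal_mstack (seq : List Int) (t : Nat) (ht : t < seq.length) :
    altTop (((mstack (hfun seq) t).dropWhile (fun s => decide (hfun seq s ≤ hfun seq t))).map
        (fun s => seq.length - 1 - s)) =
      rVal seq (seq.length - 1 - t) := by
  have hidx : seq.length - 1 - (seq.length - 1 - t) = t := by omega
  have hpred : (fun s => decide (hfun seq s ≤ hfun seq t)) =
      (fun s => !(fun j => decide (hfun seq t < hfun seq j)) s) := by
    funext s; simp only [← decide_not, not_lt]
  rw [hpred, altTop_eq_head?, List.head?_map, ← find?_eq_head?_dropWhile_not, find?_mstack]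
  unfold rVal
  rw [hidx]
  rcases ((List.range t).reverse).find? (fun j => decide (hfun seq t < hfun seq j)) with _ | s <;> rfl

lemma lVal_nonneg (seq : List Int) (i : Nat) : 0 ≤ lVal seq i := by
  unfold lVal
  rcases ((List.range i).reverse).find? (fun j => decide (gfun seq i < gfun seq j)) with _ | j
  · simp
  · positivity

lemma rVal_nonneg (seq : List Int) (i : Nat) : 0 ≤ rVal seq i := by
  unfold rVal
  rcases ((List.range (seq.length - 1 - i)).reverse).find?
      (fun s => decide (hfun seq (seq.length - 1 - i) < hfun seq s)) with _ | s
  · simp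
  · positivity

lemma pVal_nonneg (seq : List Int) (i : Nat) : 0 ≤ pVal seq i :=
  mul_nonneg (lVal_nonneg seq i) (rVal_nonneg seq i)

lemma lVal_zero (seq : List Int) : lVal seq 0 = 0 := by
  simp [lVal]

lemma rVal_last (seq : List Int) (i : Nat) (h : seq.length - 1 - i = 0) : rVal seq i = 0 := by
  simp [rVal, h]

-- ===== pass 1 of B =====
lemma pass1_inv (seq : List Int) :
    ∀ m, (List.range m).foldl (altStep1 seq) ([], []) =
      ((List.range m).map (lVal seq), mstack (gfun seq) m) := by
  intro m
  induction m with
  | zero => simp [mstack]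
  | succ m ih =>
    rw [List.range_succ, List.foldl_append, ih, List.map_append]
    simp only [List.foldl_cons, List.foldl_nil, altStep1, altStack]
    have hstack : (mstack (gfun seq) m).dropWhile
        (fun t => decide (seq.getD t 0 ≤ seq.getD m 0)) =
        (mstack (gfun seq) m).dropWhile (fun t => decide (gfun seq t ≤ gfun seq m)) := rfl
    simp only [Prod.mk.injEq]
    refine ⟨?_, ?_⟩
    · rw [hstack, lVal_mstack]
      rfl
    · rw [hstack]
      simp [mstack]

-- ===== pass 2 of B =====
lemma reverse_range_eq_map (n : Nat) :
    (List.range n).reverse = (List.range n).map (fun t => n - 1 - t) := by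
  rw [List.range_eq_range', List.reverse_range']
  simp [List.range_eq_range']

lemma getD_map_range_lVal (seq : List Int) (i : Nat) (hi : i < seq.length) :
    ((List.range seq.length).map (lVal seq)).getD i 0 = lVal seq i := by
  rw [List.getD_eq_getElem?_getD, List.getElem?_map, List.getElem?_range hi]
  rfl

lemma if_gt_eq_max (b p : Int) : (if p > b then p else b) = max b p := by
  rw [max_def]
  split_ifs <;> omega

def best (seq : List Int) (m : Nat) : Int :=
  (List.range m).foldl (fun b t => max b (pVal seq (seq.length - 1 - t))) 0

lemma pass2_inv (seq : List Int) :
    ∀ m, m ≤ seq.length →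
      (List.range m).foldl
          (fun st t => altStep2 seq ((List.range seq.length).map (lVal seq)) st (seq.length - 1 - t))
          (0, []) =
        (best seq m, (mstack (hfun seq) m).map (fun s => seq.length - 1 - s)) := by
  intro m
  induction m with
  | zero => intro _; simp [best, mstack]
  | succ m ih =>
    intro hm
    have hmn : m < seq.length := by omega
    rw [List.range_succ, List.foldl_append, ih (by omega)]
    simp only [List.foldl_cons, List.foldl_nil, altStep2, altStack]
    have hstack : ((mstack (hfun seq) m).map (fun s => seq.length - 1 - s)).dropWhile
        (fun t => decide (seq.getD t 0 ≤ seq.getD (seq.length - 1 - m) 0)) =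
        ((mstack (hfun seq) m).dropWhile (fun s => decide (hfun seq s ≤ hfun seq m))).map
          (fun s => seq.length - 1 - s) := by
      rw [List.dropWhile_map]
      rfl
    simp only [Prod.mk.injEq]
    refine ⟨?_, ?_⟩
    · rw [hstack, rVal_mstack seq m hmn,
        getD_map_range_lVal seq (seq.length - 1 - m) (by omega)]
      rw [best, best, List.range_succ, List.foldl_append]
      simp only [List.foldl_cons, List.foldl_nil]
      rw [if_gt_eq_max]
      rfl
    · rw [hstack]
      show (seq.length - 1 - m) :: _ = (mstack (hfun seq) (m+1)).map (fun s => seq.length - 1 - s)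
      simp [mstack]

lemma foldl_max_comm (l : List Int) : ∀ (a x : Int), l.foldl max (max a x) = max (l.foldl max a) x := by
  induction l with
  | nil => intro a x; rfl
  | cons y l ih =>
    intro a x
    simp only [List.foldl_cons]
    rw [max_right_comm, ih]

lemma foldl_max_reverse (l : List Int) : ∀ (a : Int), l.reverse.foldl max a = l.foldl max a := by
  induction l with
  | nil => intro a; rfl
  | cons x l ih =>
    intro a
    rw [List.reverse_cons, List.foldl_append]
    simp only [List.foldl_cons, List.foldl_nil]
    rw [ih, ← foldl_max_comm]

lemma best_eq_maxAll (seq : List Int) : best seq seq.length = maxAll seq := by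
  unfold best maxAll
  rw [← List.foldl_map (f := fun t => pVal seq (seq.length - 1 - t)) (g := max)]
  have : (List.range seq.length).map (fun t => pVal seq (seq.length - 1 - t)) =
      ((List.range seq.length).map (pVal seq)).reverse := by
    rw [← List.map_reverse, reverse_range_eq_map, List.map_map]
    rfl
  rw [this, foldl_max_reverse]

lemma alt_eq_maxAll (seq : List Int) : nextHighest_alt seq = maxAll seq := by
  unfold nextHighest_alt
  rw [pass1_inv seq seq.length]
  simp only
  rw [reverse_range_eq_map, List.foldl_map, pass2_inv seq seq.length (le_refl _)]
  simp only
  exact best_eq_maxAll seq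

-- ===== A equals maxAll =====
lemma A_l_eq (seq : List Int) (i : Nat) (hi : i < seq.length) :
    (match (PySem.List.pyRange (i : Int) (-1) (-1)).find?
        (fun j => decide (PySem.List.pyGetD seq j 0 > PySem.List.pyGetD seq (i : Int) 0)) with
    | some j => j + 1
    | none => 0) = lVal seq i := by
  rw [PySem.List.pyRange_neg_one_cons (by omega : (-1:Int) < (i:Int))]
  rw [List.find?_cons_of_neg (by simp)]
  have hrange : PySem.List.pyRange ((i:Int) - 1) (-1) (-1) =
      ((List.range i).reverse).map (fun k : Nat => (k : Int)) := by
    rw [PySem.List.pyRange_neg_one, reverse_range_eq_map, List.map_map]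
    have h1 : (((i:Int) - 1) - (-1)).toNat = i := by omega
    rw [h1]
    apply List.map_congr_left
    intro k hk
    simp only [List.mem_range] at hk
    simp only [Function.comp]
    omega
  rw [hrange, List.find?_map]
  have hpred : ((fun j => decide (PySem.List.pyGetD seq j 0 > PySem.List.pyGetD seq (i:Int) 0)) ∘
      (fun k : Nat => (k : Int))) = (fun j => decide (gfun seq i < gfun seq j)) := by
    funext k
    simp [Function.comp, gfun]
  rw [hpred]
  unfold lVal
  rcases ((List.range i).reverse).find? (fun j => decide (gfun seq i < gfun seq j)) with _ | j <;> rfl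

lemma A_r_eq (seq : List Int) (i : Nat) (hi : i < seq.length) :
    (match (PySem.List.pyRange (i : Int) (seq.length : Int) 1).find?
        (fun j => decide (PySem.List.pyGetD seq j 0 > PySem.List.pyGetD seq (i : Int) 0)) with
    | some j => j + 1
    | none => 0) = rVal seq i := by
  rw [PySem.List.pyRange_one_cons (by omega : (i:Int) < (seq.length:Int))]
  rw [List.find?_cons_of_neg (by simp)]
  have hrange : PySem.List.pyRange ((i:Int) + 1) (seq.length : Int) 1 =
      ((List.range (seq.length - 1 - i)).reverse).map (fun s => ((seq.length - 1 - s : Nat) : Int)) := by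
    rw [PySem.List.pyRange_one, reverse_range_eq_map, List.map_map]
    have h1 : ((seq.length : Int) - ((i:Int) + 1)).toNat = seq.length - 1 - i := by omega
    rw [h1]
    apply List.map_congr_left
    intro k hk
    simp only [List.mem_range] at hk
    simp only [Function.comp]
    omega
  rw [hrange, List.find?_map]
  have hidx : seq.length - 1 - (seq.length - 1 - i) = i := by omega
  have hpred : ((fun j => decide (PySem.List.pyGetD seq j 0 > PySem.List.pyGetD seq (i:Int) 0)) ∘
      (fun s : Nat => ((seq.length - 1 - s : Nat) : Int))) =
      (fun s => decide (hfun seq (seq.length - 1 - i) < hfun seq s)) := by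
    funext s
    simp only [Function.comp, PySem.List.pyGetD_natCast, gt_iff_lt]
    rw [show hfun seq (seq.length - 1 - i) = gfun seq i by unfold hfun; rw [hidx]]
    rfl
  rw [hpred]
  unfold rVal
  rcases ((List.range (seq.length - 1 - i)).reverse).find?
      (fun s => decide (hfun seq (seq.length - 1 - i) < hfun seq s)) with _ | s <;> rfl

lemma aBody_eq (seq : List Int) (i : Nat) (hi : i < seq.length) :
    aBody seq (seq.length : Int) (i : Int) = pVal seq i := by
  unfold aBody pVal
  rw [A_l_eq seq i hi, A_r_eq seq i hi]

-- maxAll through the tail: products at indices 1.. (index 0 always contributes 0)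
lemma maxAll_tail (seq : List Int) (m : Nat) (hm : seq.length = m + 1) :
    maxAll seq = ((List.range m).map (fun k => pVal seq (k + 1))).foldl max 0 := by
  unfold maxAll
  rw [hm, List.range_succ_eq_map, List.map_cons, List.map_map]
  simp only [List.foldl_cons]
  have h0 : pVal seq 0 = 0 := by unfold pVal; rw [lVal_zero]; ring
  rw [h0, show max (0:Int) 0 = 0 from by omega]
  have hmap : List.map (pVal seq ∘ Nat.succ) (List.range m) =
      List.map (fun k => pVal seq (k + 1)) (List.range m) :=
    List.map_congr_left (fun k _ => rfl)
  rw [hmap]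

lemma max?_getD_eq_foldl (L : List Int) (hne : L ≠ []) (hnn : ∀ x ∈ L, 0 ≤ x) :
    (PySem.List.max? L (fun y => y)).getD 0 = L.foldl max 0 := by
  rcases L with _ | ⟨x, t⟩
  · cases hne rfl
  · rw [PySem.List.max?_id_cons]
    simp only [Option.getD_some, List.foldl_cons]
    have : max 0 x = x := by
      have := hnn x (List.mem_cons_self ..)
      omega
    rw [this]

lemma pyGetD_numeral (seq : List Int) (k : Nat) :
    PySem.List.pyGetD seq ((k : Nat) : Int) 0 = gfun seq k := by
  rw [PySem.List.pyGetD_natCast]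
  rfl

lemma lVal_one (seq : List Int) :
    lVal seq 1 = if gfun seq 0 > gfun seq 1 then 1 else 0 := by
  by_cases h : gfun seq 1 < gfun seq 0 <;>
    simp [lVal, List.range_one, List.find?, h]

lemma rVal_one_of_three (seq : List Int) (hm : seq.length = 3) :
    rVal seq 1 = if gfun seq 2 > gfun seq 1 then 3 else 0 := by
  have hh1 : hfun seq 1 = gfun seq 1 := by unfold hfun; rw [hm]
  have hh0 : hfun seq 0 = gfun seq 2 := by unfold hfun; rw [hm]
  by_cases h : gfun seq 1 < gfun seq 2 <;>
    simp [rVal, List.range_one, List.find?, hh1, hh0, h, hm]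

theorem nextHighest_eq_maxAll (seq : List Int) : nextHighest seq = maxAll seq := by
  unfold nextHighest
  by_cases h12 : ((seq.length : Int) = 1 ∨ (seq.length : Int) = 2)
  · rw [if_pos h12]
    rcases h12 with h | h
    · rw [maxAll_tail seq 0 (by omega)]
      rfl
    · rw [maxAll_tail seq 1 (by omega)]
      have hp1 : pVal seq 1 = 0 := by
        unfold pVal
        rw [rVal_last seq 1 (by omega)]
        ring
      simp [List.range_one, hp1]
  · rw [if_neg h12]
    by_cases h3 : (seq.length : Int) = 3
    · rw [if_pos h3]
      have hm : seq.length = 3 := by omega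
      rw [if_pos (by simp)]
      have e0 := pyGetD_numeral seq 0
      have e1 := pyGetD_numeral seq 1
      have e2 := pyGetD_numeral seq 2
      simp only [Nat.cast_ofNat, Nat.cast_one, Nat.cast_zero] at e0 e1 e2
      rw [e0, e1, e2]
      rw [PySem.List.max?_id_cons]
      simp only [List.foldl_nil, Option.getD_some]
      rw [maxAll_tail seq 2 (by omega)]
      have hp2 : pVal seq 2 = 0 := by
        unfold pVal
        rw [rVal_last seq 2 (by omega)]
        ring
      have hp1 : pVal seq 1 =
          (if gfun seq 0 > gfun seq 1 then (1:Int) else 0) *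
            (if gfun seq 2 > gfun seq 1 then (3:Int) else 0) := by
        unfold pVal
        rw [lVal_one, rVal_one_of_three seq hm]
      have hmax : ((List.range 2).map (fun k => pVal seq (k + 1))).foldl max 0 = pVal seq 1 := by
        have hnn := pVal_nonneg seq 1
        simp [List.range_succ, hp2]
        omega
      rw [hmax, hp1]
    · rw [if_neg h3]
      by_cases h0 : seq.length = 0
      · rw [show ((seq.length : Int)) = 0 by omega]
        rw [show PySem.List.pyRange 1 0 1 = [] from PySem.List.pyRange_one_eq_nil (by omega)]
        simp [maxAll, h0]
      · have hm : 4 ≤ seq.length := by omega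
        have hL : (PySem.List.pyRange 1 (seq.length : Int) 1).map (aBody seq (seq.length : Int)) =
            (List.range (seq.length - 1)).map (fun k => pVal seq (k + 1)) := by
          rw [PySem.List.pyRange_one]
          rw [show ((seq.length : Int) - 1).toNat = seq.length - 1 by omega]
          rw [List.map_map]
          apply List.map_congr_left
          intro k hk
          simp only [List.mem_range] at hk
          simp only [Function.comp]
          rw [show (1 + (k : Int)) = ((k + 1 : Nat) : Int) by omega]
          exact aBody_eq seq (k + 1) (by omega)
        rw [hL]
        rw [if_pos (by simp [List.length_map, List.length_range]; omega)]
        rw [max?_getD_eq_foldl _ (by simp [List.map_eq_nil_iff, List.range_eq_nil]; omega)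
          (by
            intro x hx
            simp only [List.mem_map] at hx
            obtain ⟨k, _, rfl⟩ := hx
            exact pVal_nonneg seq (k + 1))]
        rw [maxAll_tail seq (seq.length - 1) (by omega)]

-- ===== VERDICT (by name: the statement is the Claim_ definition above) =====
theorem nextHighest_spec : Claim_equal_nextHighest := by
  intro seq _
  unfold Spec_nextHighest
  rw [nextHighest_eq_maxAll, alt_eq_maxAll]
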